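-- pv_equiv track=rewrite | github.com/alisinaee/portfolio_agent | .agents/skills/auto-docs/scripts/update_docs.py | _parse_recent_entries
-- ===== SOURCE A (Python) =====
-- def _parse_recent_entries(section_body: str) -> list[str]:
--     entries: list[str] = []
--     current: list[str] = []
--     for raw in section_body.splitlines():
--         line = raw.rstrip()
--         if line.startswith("### "):
--             if current:
--                 entries.append("\n".join(current).strip())
--             current = [line]
--             continue
--         if current:
--             current.append(line)
--     if current:
--         entries.append("\n".join(current).strip())
--     return [entry for entry in entries if entry]
-- ===== SOURCE B (Python) =====
-- def _parse_recent_entries(section_body: str) -> list[str]: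
--     lines = [raw.rstrip() for raw in section_body.splitlines()]
--     i = 0
--     while i < len(lines) and not lines[i].startswith("### "):
--         i += 1
--     lines = lines[i:]
--     chunks = []
--     while lines:
--         j = 1
--         while j < len(lines) and not lines[j].startswith("### "):
--             j += 1
--         chunks.append(lines[:j])
--         lines = lines[j:]
--     entries = ["\n".join(chunk).strip() for chunk in chunks]
--     return [entry for entry in entries if entry]
-- ===== Notes on version B (the rewrite author's own statement) =====
-- stated objective: alternative
-- what changed: Replaces A's streaming accumulator (entries/current state machine with inline flushes) by a chunking pass: rstrip all lines once, drop the pre-header prefix, split the rest into header-delimited chunks by scanning to the next header, then map join/strip and filter empties.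
import Mathlib
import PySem

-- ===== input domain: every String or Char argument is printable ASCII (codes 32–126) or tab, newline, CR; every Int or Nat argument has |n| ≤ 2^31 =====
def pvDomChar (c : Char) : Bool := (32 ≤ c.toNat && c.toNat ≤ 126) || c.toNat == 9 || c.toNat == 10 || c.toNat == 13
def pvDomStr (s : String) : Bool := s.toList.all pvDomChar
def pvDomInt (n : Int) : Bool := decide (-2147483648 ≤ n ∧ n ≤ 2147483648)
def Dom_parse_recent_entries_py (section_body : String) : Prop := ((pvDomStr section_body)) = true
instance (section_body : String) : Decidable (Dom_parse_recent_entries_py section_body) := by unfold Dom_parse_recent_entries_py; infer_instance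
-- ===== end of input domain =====

-- B replaces A's streaming accumulator by chunking at header lines (alternative decomposition, same cost).

-- ===== PORT A =====
-- one loop step of A: state = (entries, current)
def pvStepA (st : List String × List String) (raw : String) : List String × List String :=
  let line := PySem.Str.rstrip raw
  if PySem.Str.startswith line "### " then
    (if st.2 ≠ [] then st.1 ++ [PySem.Str.strip (PySem.Str.join "\n" st.2)] else st.1, [line])
  else
    if st.2 ≠ [] then (st.1, st.2 ++ [line]) else st

def parse_recent_entries_py (section_body : String) : List String :=
  let st := (PySem.Str.splitlines section_body).foldl pvStepA ([], [])
  let entries := if st.2 ≠ [] then st.1 ++ [PySem.Str.strip (PySem.Str.join "\n" st.2)] else st.1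
  entries.filter (fun e => !(e == ""))

-- ===== PORT B =====
def pvIsHdr (l : String) : Bool := PySem.Str.startswith l "### "

-- the inner while loop: current chunk = head line plus following non-header lines; recurse on the rest
def pvChunks : List String → List (List String)
  | [] => []
  | h :: rest =>
      (h :: rest.takeWhile (fun l => !pvIsHdr l)) :: pvChunks (rest.dropWhile (fun l => !pvIsHdr l))
termination_by ls => ls.length
decreasing_by
  simpa using Nat.lt_succ_of_le (List.length_dropWhile_le _ _)

def parse_recent_entries_py_alt (section_body : String) : List String :=
  let lines := (PySem.Str.splitlines section_body).map PySem.Str.rstrip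
  let lines := lines.dropWhile (fun l => !pvIsHdr l)
  let entries := (pvChunks lines).map (fun c => PySem.Str.strip (PySem.Str.join "\n" c))
  entries.filter (fun e => !(e == ""))

-- ===== PRECONDITION & SPEC =====
def Spec_parse_recent_entries_py (section_body : String) (out : List String) : Prop := out = parse_recent_entries_py_alt section_body
instance (section_body : String) (out : List String) : Decidable (Spec_parse_recent_entries_py section_body out) := by unfold Spec_parse_recent_entries_py; infer_instance

-- ===== CLAIM (what is proved, stated in full; the proofs are below) =====
def Claim_equal_parse_recent_entries_py : Prop := ∀ (section_body : String), Dom_parse_recent_entries_py section_body → Spec_parse_recent_entries_py section_body (parse_recent_entries_py section_body)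

-- ===== LEMMAS AND PROOFS =====

-- A's step on an already-rstripped line
def pvStepA' (st : List String × List String) (line : String) : List String × List String :=
  if pvIsHdr line then
    (if st.2 ≠ [] then st.1 ++ [PySem.Str.strip (PySem.Str.join "\n" st.2)] else st.1, [line])
  else
    if st.2 ≠ [] then (st.1, st.2 ++ [line]) else st

theorem pvFoldA_map (raws : List String) (st : List String × List String) :
    raws.foldl pvStepA st = (raws.map PySem.Str.rstrip).foldl pvStepA' st := by
  rw [List.foldl_map]
  rfl

def pvFinalize (st : List String × List String) : List String :=
  if st.2 ≠ [] then st.1 ++ [PySem.Str.strip (PySem.Str.join "\n" st.2)] else st.1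

-- entries accumulated so far factor out of the fold
theorem pvStepA'_shift (e c : List String) (l : String) :
    pvStepA' (e, c) l = (e ++ (pvStepA' ([], c) l).1, (pvStepA' ([], c) l).2) := by
  simp only [pvStepA']
  split_ifs <;> simp

theorem pvFoldA_shift (lines : List String) (e c : List String) :
    lines.foldl pvStepA' (e, c) =
      (e ++ (lines.foldl pvStepA' ([], c)).1, (lines.foldl pvStepA' ([], c)).2) := by
  induction lines generalizing e c with
  | nil => simp
  | cons l ls ih =>
      simp only [List.foldl_cons]
      rw [pvStepA'_shift e c l, ih, ih (pvStepA' ([], c) l).1]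
      simp

-- before the first header, A's state stays ([], [])
theorem pvFoldA_skip (lines : List String) :
    lines.foldl pvStepA' ([], []) =
      (lines.dropWhile (fun l => !pvIsHdr l)).foldl pvStepA' ([], []) := by
  induction lines with
  | nil => rfl
  | cons l ls ih =>
      by_cases h : pvIsHdr l
      · simp [h]
      · have hstep : pvStepA' ([], []) l = ([], []) := by
          simp [pvStepA', h]
        simp [h, hstep, ih]

-- main invariant: with a nonempty current buffer, A's flushed output is B's chunks
theorem pvFoldA_chunks (lines : List String) : ∀ (cur : List String), cur ≠ [] →
    pvFinalize (lines.foldl pvStepA' ([], cur)) =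
      ((cur ++ lines.takeWhile (fun l => !pvIsHdr l)) ::
        pvChunks (lines.dropWhile (fun l => !pvIsHdr l))).map
        (fun c => PySem.Str.strip (PySem.Str.join "\n" c)) := by
  induction lines with
  | nil => intro cur hcur; simp [pvFinalize, hcur, pvChunks]
  | cons l ls ih =>
      intro cur hcur
      by_cases h : pvIsHdr l
      · have hstep : pvStepA' ([], cur) l =
            ([PySem.Str.strip (PySem.Str.join "\n" cur)], [l]) := by
          simp [pvStepA', h, hcur]
        rw [List.foldl_cons, hstep, pvFoldA_shift, List.takeWhile_cons, List.dropWhile_cons]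
        simp only [h, Bool.not_true, Bool.false_eq_true, reduceIte]
        have := ih [l] (by simp)
        simp only [pvFinalize] at this ⊢
        split_ifs at this ⊢ with h1
        · rw [pvChunks]
          simp_all
        · rw [pvChunks]
          simp_all
      · have hstep : pvStepA' ([], cur) l = ([], cur ++ [l]) := by
          simp [pvStepA', h, hcur]
        rw [List.foldl_cons, hstep, List.takeWhile_cons, List.dropWhile_cons]
        have := ih (cur ++ [l]) (by simp)
        simp only [h, Bool.not_false, if_pos]
        rw [this]
        simp

-- ===== VERDICT (by name: the statement is the Claim_ definition above) =====
theorem pvTop (L : List String) :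
    (pvFinalize (L.foldl pvStepA' ([], []))).filter (fun e => !(e == "")) =
      ((pvChunks (L.dropWhile (fun l => !pvIsHdr l))).map
        (fun c => PySem.Str.strip (PySem.Str.join "\n" c))).filter (fun e => !(e == "")) := by
  rw [pvFoldA_skip]
  cases hl : (L.dropWhile (fun l => !pvIsHdr l)) with
  | nil => simp [pvFinalize, pvChunks]
  | cons h rest =>
      have hne : L.dropWhile (fun l => !pvIsHdr l) ≠ [] := by rw [hl]; simp
      have hh : pvIsHdr h := by
        have hd := List.head_dropWhile_not (fun l => !pvIsHdr l) (l := L) hne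
        simp only [hl, List.head_cons] at hd
        simpa using hd
      have hstep : pvStepA' ([], []) h = ([], [h]) := by
        simp [pvStepA', hh]
      simp only [List.foldl_cons, hstep]
      have hmain := pvFoldA_chunks rest [h] (by simp)
      simp only [pvFinalize] at hmain ⊢
      have hch : pvChunks (h :: rest) =
          (h :: rest.takeWhile (fun l => !pvIsHdr l)) ::
            pvChunks (rest.dropWhile (fun l => !pvIsHdr l)) := by
        rw [pvChunks.eq_def]
      rw [hmain, hch]
      simp

-- ===== VERDICT (by name: the statement is the Claim_ definition above) =====
theorem parse_recent_entries_py_spec : Claim_equal_parse_recent_entries_py := by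
  intro s _
  unfold Spec_parse_recent_entries_py parse_recent_entries_py parse_recent_entries_py_alt
  rw [pvFoldA_map]
  exact pvTop ((PySem.Str.splitlines s).map PySem.Str.rstrip)
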